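-- pv_equiv track=rewrite | github.com/benwing4/WingerBot | canon_arabic.py | sort_group_changelogs
-- ===== SOURCE A (Python) =====
-- def combine_adjacent(values):
--   combined = []
--   for val in values:
--     if combined:
--       last_val, num = combined[-1]
--       if val == last_val:
--         combined[-1] = (val, num + 1)
--         continue
--     combined.append((val, 1))
--   return ["%s(x%s)" % (val, num) if num > 1 else val for val, num in combined]
--
-- def sort_group_changelogs(actions):
--   grouped_actions = {}
--   begins = ["split ", "vocalize ", "match-canon ", "cross-canon ",
--       "self-canon ", "remove redundant ", "remove ", ""]
--   for begin in begins:
--     grouped_actions[begin] = []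
--   actiontype = None
--   action = ""
--   for action in actions:
--     for begin in begins:
--       if action.startswith(begin):
--         actiontag = action.replace(begin, "", 1)
--         grouped_actions[begin].append(actiontag)
--         break
--
--   grouped_action_strs = (
--     [begin + ', '.join(combine_adjacent(grouped_actions[begin]))
--         for begin in begins
--         if len(grouped_actions[begin]) > 0])
--   all_grouped_actions = '; '.join([x for x in grouped_action_strs if x])
--   return all_grouped_actions
-- ===== SOURCE B (Python) =====
-- def sort_group_changelogs(actions):
--   begins = ["split ", "vocalize ", "match-canon ", "cross-canon ",
--       "self-canon ", "remove redundant ", "remove ", ""]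
--
--   def runs(tags):
--     # two-pointer run scan: find each maximal run [i, j) and format it at once
--     out = []
--     i = 0
--     n = len(tags)
--     while i < n:
--       j = i + 1
--       while j < n and tags[j] == tags[i]:
--         j += 1
--       out.append(tags[i] if j - i == 1 else '%s(x%s)' % (tags[i], j - i))
--       i = j
--     return out
--
--   parts = []
--   for k, begin in enumerate(begins):
--     # an action belongs to this group iff this prefix matches and no
--     # higher-priority prefix does
--     tags = [a[len(begin):] for a in actions
--             if a.startswith(begin)
--             and not any(a.startswith(earlier) for earlier in begins[:k])]
--     s = begin + ', '.join(runs(tags))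
--     if tags and s:
--       parts.append(s)
--   return '; '.join(parts)
-- ===== Notes on version B (the rewrite author's own statement) =====
-- stated objective: alternative
-- what changed: Drops A's dict bucketing pass and combine_adjacent's rewrite-the-last-accumulator-entry loop: B rescans the actions per prefix with a 'matches this prefix and no higher-priority one' predicate and run-length encodes each group with a two-pointer scan that finds each maximal run [i,j) directly.
import Mathlib
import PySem

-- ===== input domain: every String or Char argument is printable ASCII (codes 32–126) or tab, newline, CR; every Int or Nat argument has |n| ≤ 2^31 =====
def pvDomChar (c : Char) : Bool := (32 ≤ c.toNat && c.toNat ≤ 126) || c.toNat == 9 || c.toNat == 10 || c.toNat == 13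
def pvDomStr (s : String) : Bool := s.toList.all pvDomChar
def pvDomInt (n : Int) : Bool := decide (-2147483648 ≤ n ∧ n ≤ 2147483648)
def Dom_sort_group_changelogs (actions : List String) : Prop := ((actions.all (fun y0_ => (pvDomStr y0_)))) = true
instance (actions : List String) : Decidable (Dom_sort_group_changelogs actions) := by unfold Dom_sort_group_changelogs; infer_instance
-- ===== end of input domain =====

-- B drops A's dict-bucketing pass and combine_adjacent's rewrite-the-last-entry accumulator:
-- it rescans the actions once per prefix ("matches this prefix and no higher-priority one")
-- and run-length encodes each group with a two-pointer scan over maximal runs (alternative; same order of cost).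

-- ===== PORT A =====
def pvBegins : List (List Char) :=
  ["split ".toList, "vocalize ".toList, "match-canon ".toList, "cross-canon ".toList,
   "self-canon ".toList, "remove redundant ".toList, "remove ".toList, "".toList]

-- hand port of action.replace(begin, "", 1): exact for new = "" — Python splices out the FIRST
-- occurrence of begin (found left to right), or returns the string unchanged if absent
def pyReplace1 (s old : List Char) : List Char :=
  let i := PySem.Chars.find s old
  if i = -1 then s else s.take i.toNat ++ s.drop (i.toNat + old.length)

def pyCombineStep (combined : List (List Char × Int)) (val : List Char) : List (List Char × Int) :=
  match combined.getLast? with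
  | some (last_val, num) =>
    if val = last_val then combined.dropLast ++ [(val, num + 1)] else combined ++ [(val, 1)]
  | none => combined ++ [(val, 1)]

def pyCombineAdjacent (values : List (List Char)) : List (List Char) :=
  (values.foldl pyCombineStep []).map
    (fun p => if p.2 > 1 then p.1 ++ "(x".toList ++ PySem.Int.toChars p.2 ++ ")".toList else p.1)

-- inner 'for begin in begins: if action.startswith(begin): …; break'
def pvGroupStep (begins : List (List Char))
    (d : PySem.Dict (List Char) (List (List Char))) (action : List Char) :
    PySem.Dict (List Char) (List (List Char)) :=
  match begins with
  | [] => d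
  | b :: rest =>
    if PySem.Chars.startswith action b then d.modify b [] (· ++ [pyReplace1 action b])
    else pvGroupStep rest d action

def sort_group_changelogs (actions : List String) : String :=
  let d0 := pvBegins.foldl (fun d b => d.insert b []) PySem.Dict.empty
  let d := actions.foldl (fun d a => pvGroupStep pvBegins d a.toList) d0
  let grouped_action_strs :=
    (pvBegins.filter (fun b => (d.getD b []).length > 0)).map
      (fun b => b ++ PySem.Chars.join ", ".toList (pyCombineAdjacent (d.getD b [])))
  String.ofList (PySem.Chars.join "; ".toList (grouped_action_strs.filter (fun x => !x.isEmpty)))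

-- ===== PORT B =====
-- inner 'while j < n and tags[j] == tags[i]: j += 1' (v = tags[i]); fuel = remaining
-- positions, a guard that only makes the loop total (never reached below its bound)
def altScan (fuel : Nat) (tags : List (List Char)) (v : List Char) (j : Nat) : Nat :=
  match fuel with
  | 0 => j
  | fuel + 1 => if j < tags.length ∧ tags[j]! = v then altScan fuel tags v (j + 1) else j

-- outer 'while i < n': each maximal run [i, j) is formatted at once
def altRuns (fuel : Nat) (tags : List (List Char)) (i : Nat) : List (List Char) :=
  match fuel with
  | 0 => []
  | fuel + 1 =>
    if i < tags.length then
      (if altScan (tags.length - (i + 1)) tags (tags[i]!) (i + 1) - i = 1 then tags[i]!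
       else tags[i]! ++ "(x".toList ++
         PySem.Int.toChars ((altScan (tags.length - (i + 1)) tags (tags[i]!) (i + 1) - i : Nat) : Int) ++ ")".toList)
        :: altRuns fuel tags (altScan (tags.length - (i + 1)) tags (tags[i]!) (i + 1))
    else []

-- the per-group comprehension: this prefix matches and no higher-priority (earlier) one does
def altTags (actions : List String) (earlier : List (List Char)) (b : List Char) :
    List (List Char) :=
  (actions.filter (fun a => PySem.Chars.startswith a.toList b &&
      !(earlier.any (fun e => PySem.Chars.startswith a.toList e)))).map
    (fun a => PySem.List.slice a.toList (some (b.length : Int)) none)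

-- 'for k, begin in enumerate(begins)' with begins[:k] carried as the accumulated earlier list
def altLoop (actions : List String) (earlier remaining : List (List Char)) :
    List (List Char) :=
  match remaining with
  | [] => []
  | b :: rest =>
    (if !(altTags actions earlier b).isEmpty &&
        !(b ++ PySem.Chars.join ", ".toList (altRuns (altTags actions earlier b).length (altTags actions earlier b) 0)).isEmpty
     then [b ++ PySem.Chars.join ", ".toList (altRuns (altTags actions earlier b).length (altTags actions earlier b) 0)]
     else []) ++ altLoop actions (earlier ++ [b]) rest

def sort_group_changelogs_alt (actions : List String) : String :=
  String.ofList (PySem.Chars.join "; ".toList (altLoop actions [] pvBegins))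

-- ===== PRECONDITION & SPEC =====
def Spec_sort_group_changelogs (actions : List String) (out : String) : Prop := out = sort_group_changelogs_alt actions
instance (actions : List String) (out : String) : Decidable (Spec_sort_group_changelogs actions out) := by unfold Spec_sort_group_changelogs; infer_instance

-- ===== CLAIM (what is proved, stated in full; the proofs are below) =====
def Claim_equal_sort_group_changelogs : Prop := ∀ (actions : List String), Dom_sort_group_changelogs actions → Spec_sort_group_changelogs actions (sort_group_changelogs actions)

-- ===== LEMMAS AND PROOFS =====

-- proof-side: A's inner break-loop computes the first matching prefix and its tag
def pvFirstMatch (begins : List (List Char)) (a : List Char) : List Char × List Char :=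
  match begins.find? (fun p => PySem.Chars.startswith a p) with
  | some p => (p, PySem.List.slice a (some (p.length : Int)) none)
  | none => ([], a)

-- s.replace(p, "", 1) strips the prefix p when p starts s
theorem replace1_of_startswith (a p : List Char) (h : PySem.Chars.startswith a p = true) :
    pyReplace1 a p = a.drop p.length := by
  have h1 : p <+: a := (PySem.Chars.startswith_iff a p).mp h
  have h2 : 0 ≤ PySem.Chars.find a p := (PySem.Chars.find_nonneg_iff a p).mpr h1.isInfix
  obtain ⟨_, hmin⟩ := PySem.Chars.find_spec h2
  have h0 : (PySem.Chars.find a p).toNat = 0 := by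
    by_contra hne
    exact hmin 0 (Nat.pos_of_ne_zero hne) (by simpa using h1)
  unfold pyReplace1
  simp only [if_neg (by omega : ¬ PySem.Chars.find a p = -1), h0]
  simp

-- the inner break-loop over the begins list is 'modify at the first matching prefix'
theorem groupStep_eq (a : List Char) (d : PySem.Dict (List Char) (List (List Char))) :
    pvGroupStep pvBegins d a =
      d.modify (pvFirstMatch pvBegins a).1 [] (· ++ [(pvFirstMatch pvBegins a).2]) := by
  have hsl : ∀ p : List Char, PySem.Chars.startswith a p = true →
      PySem.List.slice a (some ((p.length : Nat) : Int)) none = pyReplace1 a p := by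
    intro p hp
    rw [replace1_of_startswith a p hp, PySem.List.slice_from a (by positivity)]
    simp
  have hnil : PySem.Chars.startswith a ([] : List Char) = true :=
    (PySem.Chars.startswith_iff a []).mpr (List.nil_prefix)
  simp only [pvGroupStep, pvFirstMatch, pvBegins, List.find?]
  split_ifs with h1 h2 h3 h4 h5 h6 h7 h8
  · simp only [h1]; rw [hsl _ h1]
  · simp only [h1, h2]; rw [hsl _ h2]
  · simp only [h1, h2, h3]; rw [hsl _ h3]
  · simp only [h1, h2, h3, h4]; rw [hsl _ h4]
  · simp only [h1, h2, h3, h4, h5]; rw [hsl _ h5]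
  · simp only [h1, h2, h3, h4, h5, h6]; rw [hsl _ h6]
  · simp only [h1, h2, h3, h4, h5, h6, h7]; rw [hsl _ h7]
  · simp only [h1, h2, h3, h4, h5, h6, h7, h8]; rw [hsl _ h8]
  · exact absurd hnil (by simpa using h8)

-- the initial dict maps everything to []
theorem getD_foldl_insert_nil (bs : List (List Char)) :
    ∀ (d : PySem.Dict (List Char) (List (List Char))),
      (∀ k, d.getD k [] = []) → ∀ b, ((bs.foldl (fun d b => d.insert b []) d).getD b []) = [] := by
  induction bs with
  | nil => intro d hd b; exact hd b
  | cons c cs ih =>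
    intro d hd b
    refine ih _ (fun k => ?_) b
    rw [PySem.Dict.getD_insert]
    split_ifs
    · rfl
    · exact hd k

theorem d0_getD (b : List Char) :
    ((pvBegins.foldl (fun d b => d.insert b ([] : List (List Char))) PySem.Dict.empty)).getD b [] = [] :=
  getD_foldl_insert_nil pvBegins PySem.Dict.empty (fun k => PySem.Dict.getD_empty _ _) b

-- first-match characterization: with b not occurring among the other begins,
-- the first match is b iff b matches and no earlier prefix does, and then the tag is the slice
theorem firstMatch_eq (b : List Char) (rest : List (List Char)) (hbr : b ∉ rest) :
    ∀ (earlier : List (List Char)), b ∉ earlier → ∀ (a : List Char),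
      ((pvFirstMatch (earlier ++ b :: rest) a).1 = b ↔
        (PySem.Chars.startswith a b = true ∧ ∀ p ∈ earlier, PySem.Chars.startswith a p = false)) ∧
      ((pvFirstMatch (earlier ++ b :: rest) a).1 = b →
        (pvFirstMatch (earlier ++ b :: rest) a).2 =
          PySem.List.slice a (some (b.length : Int)) none) := by
  intro earlier
  induction earlier with
  | nil =>
    intro _ a
    by_cases hsw : PySem.Chars.startswith a b = true
    · have hfm : pvFirstMatch ([] ++ b :: rest) a =
          (b, PySem.List.slice a (some (b.length : Int)) none) := by
        unfold pvFirstMatch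
        simp [List.find?, hsw]
      rw [hfm]
      constructor
      · simp [hsw]
      · intro _; rfl
    · have hswf : PySem.Chars.startswith a b = false := by simpa using hsw
      have hred : List.find? (fun p => PySem.Chars.startswith a p) (b :: rest)
          = List.find? (fun p => PySem.Chars.startswith a p) rest := by
        simp [List.find?, hswf]
      unfold pvFirstMatch
      simp only [List.nil_append, hred]
      cases hr : List.find? (fun p => PySem.Chars.startswith a p) rest with
      | some p =>
        have hmem : p ∈ rest := List.mem_of_find?_eq_some hr
        have hne : p ≠ b := fun h => hbr (h ▸ hmem)
        dsimp only
        refine ⟨⟨fun h => absurd h hne, ?_⟩, fun h => absurd h hne⟩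
        rintro ⟨h1, _⟩
        rw [h1] at hswf
        cases hswf
      | none =>
        have hb0 : b ≠ [] := by
          intro h
          rw [h] at hswf
          have hh : PySem.Chars.startswith a [] = true :=
            (PySem.Chars.startswith_iff a []).mpr List.nil_prefix
          rw [hh] at hswf
          cases hswf
        dsimp only
        refine ⟨⟨fun h => absurd h.symm hb0, ?_⟩, fun h => absurd h.symm hb0⟩
        rintro ⟨h1, _⟩
        rw [h1] at hswf
        cases hswf
  | cons e es ih =>
    intro hbe a
    have hbes : b ∉ es := fun h => hbe (List.mem_cons_of_mem _ h)
    have hbne : e ≠ b := fun h => hbe (by rw [h]; exact List.mem_cons_self ..)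
    by_cases hsw : PySem.Chars.startswith a e = true
    · have hfm : pvFirstMatch ((e :: es) ++ b :: rest) a =
          (e, PySem.List.slice a (some (e.length : Int)) none) := by
        unfold pvFirstMatch
        simp [List.find?, hsw]
      rw [hfm]
      constructor
      · constructor
        · intro h; exact absurd h hbne
        · rintro ⟨_, hall⟩
          have := hall e (by simp)
          rw [hsw] at this
          cases this
      · intro h; exact absurd h hbne
    · have hswf : PySem.Chars.startswith a e = false := by simpa using hsw
      have hstep : pvFirstMatch ((e :: es) ++ b :: rest) a = pvFirstMatch (es ++ b :: rest) a := by
        unfold pvFirstMatch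
        have : List.find? (fun p => PySem.Chars.startswith a p) ((e :: es) ++ b :: rest)
            = List.find? (fun p => PySem.Chars.startswith a p) (es ++ b :: rest) := by
          simp [List.find?, hswf]
        rw [this]
      rw [hstep]
      obtain ⟨hiff, hsnd⟩ := ih hbes a
      refine ⟨?_, hsnd⟩
      rw [hiff]
      constructor
      · rintro ⟨h1, h2⟩
        refine ⟨h1, ?_⟩
        intro p hp
        rcases List.mem_cons.mp hp with h | h
        · rw [h]; exact hswf
        · exact h2 p h
      · rintro ⟨h1, h2⟩
        exact ⟨h1, fun p hp => h2 p (List.mem_cons_of_mem _ hp)⟩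

-- the final dict at key b (for any decomposition pvBegins = e₁ ++ b :: e₂) holds B's group
theorem getD_char (actions : List String) (e₁ e₂ : List (List Char)) (b : List Char)
    (h : pvBegins = e₁ ++ b :: e₂) :
    (actions.foldl (fun d a => pvGroupStep pvBegins d a.toList)
        (pvBegins.foldl (fun d b => d.insert b []) PySem.Dict.empty)).getD b []
      = altTags actions e₁ b := by
  have hnodup : pvBegins.Nodup := by decide
  rw [h] at hnodup
  have hbe : b ∉ e₁ := by
    intro hb
    exact (List.disjoint_of_nodup_append hnodup) hb (by simp)
  have hbr : b ∉ e₂ := by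
    have := (List.nodup_append.mp hnodup).2.1
    exact (List.nodup_cons.mp this).1
  have hfm := fun a => firstMatch_eq b e₂ hbr e₁ hbe a
  rw [PySem.List.foldl_congr_mem actions
      (fun d a => pvGroupStep pvBegins d a.toList)
      (fun d (a : String) => d.modify (pvFirstMatch pvBegins a.toList).1 []
        (· ++ [(pvFirstMatch pvBegins a.toList).2]))
      (pvBegins.foldl (fun d b => d.insert b []) PySem.Dict.empty)
      (fun acc x _ => groupStep_eq x.toList acc)]
  rw [← List.foldl_map (f := fun a : String => pvFirstMatch pvBegins a.toList)
      (g := fun (d : PySem.Dict (List Char) (List (List Char)))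
          (p : List Char × List Char) => d.modify p.1 [] (· ++ [p.2]))]
  rw [PySem.Dict.getD_foldl_modify_append, d0_getD]
  rw [List.filter_map, List.map_map]
  simp only [List.nil_append]
  rw [h]
  unfold altTags
  have hpred : ∀ a : String, (((pvFirstMatch (e₁ ++ b :: e₂) a.toList).1 == b) : Bool)
      = (PySem.Chars.startswith a.toList b &&
          !(e₁.any (fun e => PySem.Chars.startswith a.toList e))) := by
    intro a
    rcases hfm a.toList with ⟨hiff, _⟩
    by_cases hc : (pvFirstMatch (e₁ ++ b :: e₂) a.toList).1 = b
    · rcases hiff.mp hc with ⟨h1, h2⟩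
      have hany : (e₁.any (fun e => PySem.Chars.startswith a.toList e)) = false := by
        rw [List.any_eq_false]
        intro e he
        simp [h2 e he]
      simp [hc, h1, hany]
    · have hnc : ¬(PySem.Chars.startswith a.toList b = true ∧
          ∀ p ∈ e₁, PySem.Chars.startswith a.toList p = false) :=
        fun hh => hc (hiff.mpr hh)
      have hbeq : (((pvFirstMatch (e₁ ++ b :: e₂) a.toList).1 == b) : Bool) = false := by
        simp [hc]
      rw [hbeq]
      by_cases h1 : PySem.Chars.startswith a.toList b = true
      · have h2 : ¬∀ p ∈ e₁, PySem.Chars.startswith a.toList p = false :=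
          fun hh => hnc ⟨h1, hh⟩
        push_neg at h2
        rcases h2 with ⟨p, hp, hps⟩
        have hpt : PySem.Chars.startswith a.toList p = true := by
          cases hpp : PySem.Chars.startswith a.toList p
          · exact absurd hpp hps
          · rfl
        have hany : (e₁.any fun e => PySem.Chars.startswith a.toList e) = true :=
          List.any_eq_true.mpr ⟨p, hp, hpt⟩
        simp [h1, hany]
      · have h1f : PySem.Chars.startswith a.toList b = false := by simpa using h1
        simp [h1f]
  rw [List.filter_congr (fun a _ => by
    simpa only [Function.comp] using hpred a)]
  apply List.map_congr_left
  intro a ha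
  have hcond := List.of_mem_filter ha
  simp only [Bool.and_eq_true] at hcond
  rcases hfm a.toList with ⟨hiff, hsnd⟩
  have h1 : PySem.Chars.startswith a.toList b = true := hcond.1
  have hanyf : (e₁.any fun e => PySem.Chars.startswith a.toList e) = false := by
    simpa using hcond.2
  have h2 : ∀ p ∈ e₁, PySem.Chars.startswith a.toList p = false := by
    intro p hp
    cases hpp : PySem.Chars.startswith a.toList p
    · rfl
    · exact absurd (List.any_eq_true.mpr ⟨p, hp, hpp⟩) (by simp [hanyf])
  simp only [Function.comp_apply]
  exact hsnd (hiff.mpr ⟨h1, h2⟩)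

-- proof-side list view of B's two-pointer run scan
def pvRunsL : List (List Char) → List (List Char)
  | [] => []
  | x :: xs =>
    (if (xs.takeWhile (· = x)).length = 0 then x
     else x ++ "(x".toList ++
       PySem.Int.toChars (((xs.takeWhile (· = x)).length + 1 : Nat) : Int) ++ ")".toList)
      :: pvRunsL (xs.drop (xs.takeWhile (· = x)).length)
termination_by l => l.length
decreasing_by simp only [List.length_drop, List.length_cons]; omega

theorem altScan_eq (tags : List (List Char)) (v : List Char) :
    ∀ (fuel j : Nat), tags.length - j ≤ fuel →
      altScan fuel tags v j = j + ((tags.drop j).takeWhile (· = v)).length := by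
  intro fuel
  induction fuel with
  | zero =>
    intro j hj
    rw [List.drop_eq_nil_of_le (by omega)]
    simp [altScan]
  | succ fuel ih =>
    intro j hj
    simp only [altScan]
    by_cases h : j < tags.length ∧ tags[j]! = v
    · rw [if_pos h, ih (j + 1) (by omega)]
      rw [List.drop_eq_getElem_cons h.1]
      have hv : tags[j] = v := by
        have := h.2
        rwa [getElem!_pos tags j h.1] at this
      rw [List.takeWhile_cons, if_pos (by simp [hv])]
      simp only [List.length_cons]
      omega
    · rw [if_neg h]
      by_cases hjl : j < tags.length
      · have hv : ¬ tags[j]! = v := fun hv => h ⟨hjl, hv⟩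
        rw [getElem!_pos tags j hjl] at hv
        rw [List.drop_eq_getElem_cons hjl, List.takeWhile_cons, if_neg (by simp [hv])]
        simp
      · rw [List.drop_eq_nil_of_le (by omega)]
        simp

theorem altRuns_eq (tags : List (List Char)) :
    ∀ (fuel i : Nat), tags.length - i ≤ fuel →
      altRuns fuel tags i = pvRunsL (tags.drop i) := by
  intro fuel
  induction fuel with
  | zero =>
    intro i hi
    rw [List.drop_eq_nil_of_le (by omega)]
    simp [altRuns, pvRunsL]
  | succ fuel ih =>
    intro i hi
    simp only [altRuns]
    by_cases h : i < tags.length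
    · rw [if_pos h]
      rw [List.drop_eq_getElem_cons h]
      have hgx : tags[i]! = tags[i] := getElem!_pos tags i h
      have hscan : altScan (tags.length - (i + 1)) tags (tags[i]!) (i + 1)
          = i + 1 + ((tags.drop (i + 1)).takeWhile (· = tags[i])).length := by
        rw [altScan_eq tags (tags[i]!) (tags.length - (i + 1)) (i + 1) (by omega), hgx]
      have hlen : ((tags.drop (i + 1)).takeWhile (· = tags[i])).length ≤ tags.length - (i + 1) := by
        have h1 : ((tags.drop (i + 1)).takeWhile (· = tags[i])).length ≤ (tags.drop (i + 1)).length :=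
          (List.takeWhile_prefix _).length_le
        simpa using h1
      rw [pvRunsL]
      have hdd : (tags.drop (i + 1)).drop ((tags.drop (i + 1)).takeWhile (· = tags[i])).length
          = tags.drop (i + 1 + ((tags.drop (i + 1)).takeWhile (· = tags[i])).length) := by
        rw [List.drop_drop]
      rw [hdd, ← hscan, ih (altScan (tags.length - (i + 1)) tags (tags[i]!) (i + 1)) (by rw [hscan]; omega)]
      congr 1
      rw [hscan, hgx]
      have harith : i + 1 + ((tags.drop (i + 1)).takeWhile (· = tags[i])).length - i
          = ((tags.drop (i + 1)).takeWhile (· = tags[i])).length + 1 := by omega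
      rw [harith]
      by_cases hk : ((tags.drop (i + 1)).takeWhile (· = tags[i])).length = 0
      · simp [hk]
      · rw [if_neg (by omega), if_neg hk]
    · rw [if_neg h, List.drop_eq_nil_of_le (by omega)]
      simp [pvRunsL]

-- absorbing a run into the accumulator's last entry
theorem combine_absorb (ts : List (List Char)) (acc : List (List Char × Int))
    (v : List Char) (n : Int) :
    ts.foldl pyCombineStep (acc ++ [(v, n)]) =
      (ts.dropWhile (· = v)).foldl pyCombineStep
        (acc ++ [(v, n + ((ts.takeWhile (· = v)).length : Int))]) := by
  induction ts generalizing n with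
  | nil => simp
  | cons x xs ih =>
    by_cases hx : x = v
    · subst hx
      rw [List.foldl_cons]
      have hstep : pyCombineStep (acc ++ [(x, n)]) x = acc ++ [(x, n + 1)] := by
        unfold pyCombineStep
        rw [List.getLast?_concat]
        simp
      rw [hstep, ih]
      rw [List.takeWhile_cons, if_pos (by simp), List.dropWhile_cons, if_pos (by simp)]
      simp only [List.length_cons]
      have harg : n + 1 + (((xs.takeWhile (· = x)).length : Nat) : Int)
          = n + ((((xs.takeWhile (· = x)).length + 1 : Nat)) : Int) := by omega
      rw [harg]
    · rw [List.takeWhile_cons, if_neg (by simp [hx]), List.dropWhile_cons,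
        if_neg (by simp [hx])]
      simp

theorem head?_dropWhile_ne {α : Type} (p : α → Bool) (l : List α) (x : α)
    (h : (l.dropWhile p).head? = some x) : p x = false := by
  induction l with
  | nil => simp [List.dropWhile] at h
  | cons y ys ih =>
    rw [List.dropWhile_cons] at h
    split_ifs at h with hy
    · exact ih h
    · simp at h
      subst h
      simpa using hy

theorem dropWhile_eq_drop_takeWhile {α : Type} (p : α → Bool) (l : List α) :
    l.dropWhile p = l.drop (l.takeWhile p).length := by
  induction l with
  | nil => simp
  | cons x xs ih =>
    rw [List.dropWhile_cons, List.takeWhile_cons]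
    by_cases hx : p x = true
    · rw [if_pos hx, if_pos hx]
      simpa using ih
    · rw [if_neg hx, if_neg hx]
      simp

-- A's combine loop, viewed against B's run decomposition
theorem combine_fold (ts : List (List Char)) :
    ∀ (acc : List (List Char × Int)),
      (∀ p x, acc.getLast? = some p → ts.head? = some x → p.1 ≠ x) →
      (ts.foldl pyCombineStep acc).map
          (fun p => if p.2 > 1 then p.1 ++ "(x".toList ++ PySem.Int.toChars p.2 ++ ")".toList else p.1)
        = acc.map
            (fun p => if p.2 > 1 then p.1 ++ "(x".toList ++ PySem.Int.toChars p.2 ++ ")".toList else p.1)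
          ++ pvRunsL ts := by
  induction ts using pvRunsL.induct with
  | case1 =>
    intro acc _
    simp [pvRunsL]
  | case2 x xs ih =>
    intro acc hc
    rw [List.foldl_cons]
    have hstep : pyCombineStep acc x = acc ++ [(x, 1)] := by
      unfold pyCombineStep
      cases hl : acc.getLast? with
      | none => rfl
      | some p =>
        obtain ⟨v, m⟩ := p
        have hne : v ≠ x := hc (v, m) x hl (by simp)
        simp [show ¬ x = v from fun hh => hne hh.symm]
    have hcnd : ∀ (p : List Char × Int) (y : List Char),
        ((acc ++ [(x, 1 + (((xs.takeWhile (· = x)).length : Nat) : Int))]).getLast? = some p) →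
        ((xs.drop (xs.takeWhile (· = x)).length).head? = some y) → p.1 ≠ y := by
      intro p y hp hy
      rw [List.getLast?_concat] at hp
      injection hp with hp
      subst hp
      rw [← dropWhile_eq_drop_takeWhile] at hy
      have hyx := head?_dropWhile_ne (· = x) xs y hy
      have hyx' : ¬ (y = x) := of_decide_eq_false hyx
      exact fun hh => hyx' hh.symm
    rw [hstep, combine_absorb, dropWhile_eq_drop_takeWhile, ih _ hcnd]
    rw [List.map_append]
    simp only [List.map_cons, List.map_nil, pvRunsL]
    rw [List.append_assoc, List.singleton_append]
    congr 2
    by_cases hk : (xs.takeWhile (· = x)).length = 0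
    · have h1 : (1 + (((xs.takeWhile (· = x)).length : Nat) : Int)) = 1 := by
        rw [hk]; simp
      simp [hk, h1]
    · have h1 : (1 + (((xs.takeWhile (· = x)).length : Nat) : Int)) > 1 := by
        have := Nat.pos_of_ne_zero hk
        push_cast
        omega
      have h2 : (1 + (((xs.takeWhile (· = x)).length : Nat) : Int))
          = (((xs.takeWhile (· = x)).length + 1 : Nat) : Int) := by
        omega
      rw [if_neg hk, if_pos h1, h2]

-- combine_adjacent equals B's two-pointer run encoding
theorem combine_eq (ts : List (List Char)) :
    pyCombineAdjacent ts = altRuns ts.length ts 0 := by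
  rw [altRuns_eq ts ts.length 0 (by omega)]
  unfold pyCombineAdjacent
  rw [combine_fold ts [] (by intro p x hp _; simp at hp)]
  simp

theorem pv_if_head (s : List Char) (L : List (List Char)) :
    (if (!s.isEmpty) = true then s :: L else L)
      = (if (!s.isEmpty) = true then [s] else []) ++ L := by
  by_cases h : s.isEmpty <;> simp [h]

theorem decide_pos_eq_not_isEmpty {α : Type} (l : List α) :
    decide (0 < l.length) = !l.isEmpty := by
  cases l <;> simp

-- the grouped/filtered/joined A-side list equals B's loop, for any suffix of pvBegins
theorem loop_eq (actions : List String) (remaining e₁ : List (List Char))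
    (h : pvBegins = e₁ ++ remaining) :
    (((remaining.filter (fun b =>
          ((actions.foldl (fun d a => pvGroupStep pvBegins d a.toList)
              (pvBegins.foldl (fun d b => d.insert b []) PySem.Dict.empty)).getD b []).length > 0)).map
        (fun b => b ++ PySem.Chars.join ", ".toList
          (pyCombineAdjacent
            ((actions.foldl (fun d a => pvGroupStep pvBegins d a.toList)
              (pvBegins.foldl (fun d b => d.insert b []) PySem.Dict.empty)).getD b [])))).filter
      (fun x => !x.isEmpty))
    = altLoop actions e₁ remaining := by
  induction remaining generalizing e₁ with
  | nil => simp [altLoop]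
  | cons b rest ih =>
    have hgd := getD_char actions e₁ rest b h
    have hrec := ih (e₁ ++ [b]) (by rw [h]; simp)
    simp only [altLoop]
    simp only [List.filter_cons]
    rw [hgd]
    by_cases h1 : 0 < (altTags actions e₁ b).length
    · rw [if_pos (by simpa using h1)]
      simp only [List.map_cons]
      rw [hgd, combine_eq]
      simp only [List.filter_cons]
      rw [hrec]
      have hnE : (!(altTags actions e₁ b).isEmpty) = true := by
        rw [← decide_pos_eq_not_isEmpty]
        simpa using h1
      rw [hnE]
      simp only [Bool.true_and]
      exact pv_if_head _ _
    · rw [if_neg (by simpa using h1)]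
      rw [hrec]
      have hE : (!(altTags actions e₁ b).isEmpty) = false := by
        rw [← decide_pos_eq_not_isEmpty]
        simpa using h1
      rw [hE]
      simp

-- ===== VERDICT (by name: the statement is the Claim_ definition above) =====
theorem sort_group_changelogs_spec : Claim_equal_sort_group_changelogs := by
  intro actions _
  unfold Spec_sort_group_changelogs
  simp only [sort_group_changelogs, sort_group_changelogs_alt]
  rw [loop_eq actions pvBegins [] (by simp)]
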